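-- pv_equiv track=rewrite | github.com/Atra0003/infof106-partie2-Atra0003 | partie2.py | extract_pos
-- ===== SOURCE A (Python) =====
-- def extract_pos(n, str_pos):
--     """
--     Traduit les positions des pions enregistré
--     dans le fichier texte en position de matrice
--     """
--     cpt = 1
--     capital = "a"
--     while capital != str_pos[0]:
--         cpt += 1
--         capital = chr(ord(capital)+1)
--     colonne = cpt - 1 # Colonne
--     ligne = n - int(str_pos[1:]) # Ligne
--     return (ligne, colonne)
-- ===== SOURCE B (Python) =====
-- def extract_pos(n, str_pos):
--     """
--     Traduit les positions des pions enregistre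
--     dans le fichier texte en position de matrice
--     """
--     colonne = ord(str_pos[0]) - ord('a')
--     ligne = n - int(str_pos[1:])
--     return (ligne, colonne)
-- ===== Notes on version B (the rewrite author's own statement) =====
-- stated objective: idiomatic
-- what changed: Replaces the while-loop that counts letters up from 'a' with the constant-time closed form ord(str_pos[0]) - ord('a').
import Mathlib
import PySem

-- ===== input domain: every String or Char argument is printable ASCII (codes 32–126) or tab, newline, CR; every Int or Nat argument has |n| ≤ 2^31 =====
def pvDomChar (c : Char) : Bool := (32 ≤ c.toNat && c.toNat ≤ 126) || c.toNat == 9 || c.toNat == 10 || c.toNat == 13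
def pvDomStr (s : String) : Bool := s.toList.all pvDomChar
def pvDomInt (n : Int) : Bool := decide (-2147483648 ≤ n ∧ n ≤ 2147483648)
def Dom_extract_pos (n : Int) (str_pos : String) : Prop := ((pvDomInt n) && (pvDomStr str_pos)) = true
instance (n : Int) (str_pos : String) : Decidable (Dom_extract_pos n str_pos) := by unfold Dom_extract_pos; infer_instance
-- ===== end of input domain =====

-- B replaces A's while-loop counting letters up from 'a' with the closed form ord(str_pos[0]) - ord('a').

-- ===== PORT A =====
-- A's while-loop: cpt starts at 1, capital at 'a'; increments until capital equals the target
-- character.  Fuel makes the recursion total (Python diverges when the target is below 'a';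
-- such inputs are outside Pre_, where fuel 256 is always enough).
def pvLoopA (target : Char) : Nat → Int → Char → Int
  | 0, cpt, _ => cpt
  | f + 1, cpt, capital =>
      if capital = target then cpt
      else pvLoopA target f (cpt + 1) (Char.ofNat (capital.toNat + 1))

def extract_pos (n : Int) (str_pos : String) : Int × Int :=
  match str_pos.toList with
  | [] => (0, 0)  -- unreachable under Pre_ (Python raises IndexError on "")
  | c :: rest =>
      let cpt := pvLoopA c 256 1 'a'
      let colonne := cpt - 1
      let ligne := n - (PySem.Int.ofStr? (String.mk rest)).getD 0
      (ligne, colonne)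

-- ===== PORT B =====
def extract_pos_alt (n : Int) (str_pos : String) : Int × Int :=
  match str_pos.toList with
  | [] => (0, 0)  -- unreachable under Pre_ (Python raises IndexError on "")
  | c :: rest =>
      let colonne : Int := (c.toNat : Int) - 97
      let ligne := n - (PySem.Int.ofStr? (String.mk rest)).getD 0
      (ligne, colonne)

-- ===== PRECONDITION & SPEC =====
-- Pre_ excludes: the empty string (A raises IndexError), a first character below 'a' (A's
-- while-loop never terminates), and a tail that is not a valid int literal (A raises ValueError).
def Pre_extract_pos (n : Int) (str_pos : String) : Prop :=
  str_pos.toList ≠ [] ∧ 97 ≤ (str_pos.toList.headD ' ').toNat ∧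
    (PySem.Int.ofStr? (String.mk str_pos.toList.tail)).isSome = true
instance (n : Int) (str_pos : String) : Decidable (Pre_extract_pos n str_pos) := by
  unfold Pre_extract_pos; infer_instance

def pvWitness_extract_pos : Int × String := (8, "c5")

def Spec_extract_pos (n : Int) (str_pos : String) (out : Int × Int) : Prop := out = extract_pos_alt n str_pos
instance (n : Int) (str_pos : String) (out : Int × Int) : Decidable (Spec_extract_pos n str_pos out) := by unfold Spec_extract_pos; infer_instance

-- ===== CLAIM (what is proved, stated in full; the proofs are below) =====
def Claim_equal_extract_pos : Prop := ∀ (n : Int) (str_pos : String), Dom_extract_pos n str_pos → Pre_extract_pos n str_pos → Spec_extract_pos n str_pos (extract_pos n str_pos)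

-- ===== LEMMAS AND PROOFS =====

-- A's counting loop computes cpt + (t - k) when started at code k ≤ t with enough fuel.
theorem pvLoopA_val (t : Nat) (ht : t < 55296) :
    ∀ (f : Nat) (cpt : Int) (k : Nat), k ≤ t → t - k < f →
      pvLoopA (Char.ofNat t) f cpt (Char.ofNat k) = cpt + ((t - k : Nat) : Int) := by
  intro f
  induction f with
  | zero => intro _ _ _ h; omega
  | succ f ih =>
      intro cpt k hk hf
      have hkv : (Char.ofNat k).toNat = k := by
        rw [Char.toNat_ofNat, if_pos (Or.inl (by omega : k < 55296))]
      by_cases he : k = t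
      · subst he
        simp [pvLoopA]
      · have hlt : k < t := by omega
        have hne : Char.ofNat k ≠ Char.ofNat t := by
          intro h
          have := congrArg Char.toNat h
          have htv : (Char.ofNat t).toNat = t := by
            rw [Char.toNat_ofNat, if_pos (Or.inl ht)]
          omega
        rw [pvLoopA, if_neg hne, hkv]
        rw [ih (cpt + 1) (k + 1) (by omega) (by omega)]
        omega

-- ===== VERDICT (by name: the statement is the Claim_ definition above) =====
theorem extract_pos_spec : Claim_equal_extract_pos := by
  intro n str_pos hdom hpre
  obtain ⟨hne, hge, _⟩ := hpre
  unfold Spec_extract_pos extract_pos extract_pos_alt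
  cases hl : str_pos.toList with
  | nil => exact absurd hl hne
  | cons c rest =>
      have hcdom : pvDomChar c = true := by
        have : pvDomStr str_pos = true := by
          unfold Dom_extract_pos at hdom
          simp only [Bool.and_eq_true] at hdom
          exact hdom.2
        unfold pvDomStr at this
        rw [hl] at this
        simp only [List.all_cons, Bool.and_eq_true] at this
        exact this.1
      have hle : c.toNat ≤ 126 := by
        simp only [pvDomChar, Bool.or_eq_true, Bool.and_eq_true, decide_eq_true_eq,
          beq_iff_eq] at hcdom
        omega
      have hge' : 97 ≤ c.toNat := by rw [hl] at hge; simpa using hge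
      have hc : Char.ofNat c.toNat = c := Char.ofNat_toNat c
      have h97 : Char.ofNat 97 = 'a' := by decide
      have := pvLoopA_val c.toNat (by omega) 256 1 97 (by omega) (by omega)
      rw [hc, h97] at this
      simp only [this]
      simp only [Prod.mk.injEq]
      refine ⟨trivial, ?_⟩
      omega
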